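-- pv_equiv track=rewrite | github.com/estructuraPy/ePy_docs | src/ePy_docs/core/_tables.py | _fallback_superscript_processing
-- ===== SOURCE A (Python) =====
-- def _fallback_superscript_processing(text: str) -> str:
--     """Fallback superscript processing with direct Unicode mapping."""
--     if not text or '^' not in text:
--         return text
--
--     # Direct Unicode superscript mapping
--     superscript_map = {
--         '^0': '⁰', '^1': '¹', '^2': '²', '^3': '³', '^4': '⁴',
--         '^5': '⁵', '^6': '⁶', '^7': '⁷', '^8': '⁸', '^9': '⁹',
--         '^10': '¹⁰', '^11': '¹¹', '^12': '¹²',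
--         '^n': 'ⁿ', '^x': 'ˣ', '^y': 'ʸ', '^i': 'ⁱ', '^j': 'ʲ', '^k': 'ᵏ',
--         '^+': '⁺', '^-': '⁻', '^=': '⁼'
--     }
--
--     # Apply replacements (longer patterns first to avoid conflicts)
--     result = text
--     for pattern in sorted(superscript_map.keys(), key=len, reverse=True):
--         result = result.replace(pattern, superscript_map[pattern])
--
--     return result
-- ===== SOURCE B (Python) =====
-- def _fallback_superscript_processing(text: str) -> str:
--     """Fallback superscript processing: single left-to-right scan instead of 22 replace passes."""
--     if not text or '^' not in text:
--         return text
--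
--     superscript_map = {
--         '^0': '⁰', '^1': '¹', '^2': '²', '^3': '³', '^4': '⁴',
--         '^5': '⁵', '^6': '⁶', '^7': '⁷', '^8': '⁸', '^9': '⁹',
--         '^10': '¹⁰', '^11': '¹¹', '^12': '¹²',
--         '^n': 'ⁿ', '^x': 'ˣ', '^y': 'ʸ', '^i': 'ⁱ', '^j': 'ʲ', '^k': 'ᵏ',
--         '^+': '⁺', '^-': '⁻', '^=': '⁼'
--     }
--
--     out = []
--     i = 0
--     n = len(text)
--     while i < n:
--         if text[i] == '^':
--             three = text[i:i+3]
--             if len(three) == 3 and three in superscript_map: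
--                 out.append(superscript_map[three])
--                 i += 3
--                 continue
--             two = text[i:i+2]
--             if len(two) == 2 and two in superscript_map:
--                 out.append(superscript_map[two])
--                 i += 2
--                 continue
--         out.append(text[i])
--         i += 1
--     return ''.join(out)
-- ===== Notes on version B (the rewrite author's own statement) =====
-- stated objective: alternative
-- what changed: A runs 22 sequential str.replace passes (one full traversal of the string per pattern); B makes a single left-to-right cursor scan, looking each caret-started slice (3-char key before 2-char key) up in the dict and emitting each output piece once.
import Mathlib
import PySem

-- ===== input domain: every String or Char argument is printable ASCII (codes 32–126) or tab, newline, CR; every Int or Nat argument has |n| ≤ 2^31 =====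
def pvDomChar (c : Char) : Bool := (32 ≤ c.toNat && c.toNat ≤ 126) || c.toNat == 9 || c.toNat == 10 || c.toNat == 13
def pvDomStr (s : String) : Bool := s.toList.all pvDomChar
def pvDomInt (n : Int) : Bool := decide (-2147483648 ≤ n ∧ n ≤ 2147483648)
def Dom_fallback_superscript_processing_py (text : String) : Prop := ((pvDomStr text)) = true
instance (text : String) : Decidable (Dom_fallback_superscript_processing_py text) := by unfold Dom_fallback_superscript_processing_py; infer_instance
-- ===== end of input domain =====

-- B replaces A's 22 sequential str.replace passes by ONE left-to-right scan that maps each '^'-marker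
-- where it stands (3-char keys tried before 2-char keys); objective: alternative single-pass algorithm.

-- ===== PORT A =====
-- the dict literal of A, in insertion order
def pvSupMapA : PySem.Dict String String := PySem.Dict.ofList
  [("^0", "⁰"), ("^1", "¹"), ("^2", "²"), ("^3", "³"), ("^4", "⁴"),
   ("^5", "⁵"), ("^6", "⁶"), ("^7", "⁷"), ("^8", "⁸"), ("^9", "⁹"),
   ("^10", "¹⁰"), ("^11", "¹¹"), ("^12", "¹²"),
   ("^n", "ⁿ"), ("^x", "ˣ"), ("^y", "ʸ"), ("^i", "ⁱ"), ("^j", "ʲ"), ("^k", "ᵏ"),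
   ("^+", "⁺"), ("^-", "⁻"), ("^=", "⁼")]

def fallback_superscript_processing_py (text : String) : String :=
  -- if not text or '^' not in text: return text
  if text = "" ∨ PySem.Str.isIn "^" text = false then text
  else
    -- for pattern in sorted(superscript_map.keys(), key=len, reverse=True): result = result.replace(...)
    -- (superscript_map[pattern] ported as getD with default ""; every looked-up key is present)
    let patterns := PySem.List.sorted pvSupMapA.keys (fun s => PySem.Str.len s) true
    patterns.foldl (fun result pattern => PySem.Str.replace result pattern (pvSupMapA.getD pattern "")) text

-- ===== PORT B =====
-- B's dict, as an association list over char lists (same entries, insertion order)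
def pvSupMapB : List (List Char × List Char) :=
  [(['^','0'], ['⁰']), (['^','1'], ['¹']), (['^','2'], ['²']), (['^','3'], ['³']), (['^','4'], ['⁴']),
   (['^','5'], ['⁵']), (['^','6'], ['⁶']), (['^','7'], ['⁷']), (['^','8'], ['⁸']), (['^','9'], ['⁹']),
   (['^','1','0'], ['¹','⁰']), (['^','1','1'], ['¹','¹']), (['^','1','2'], ['¹','²']),
   (['^','n'], ['ⁿ']), (['^','x'], ['ˣ']), (['^','y'], ['ʸ']), (['^','i'], ['ⁱ']), (['^','j'], ['ʲ']), (['^','k'], ['ᵏ']),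
   (['^','+'], ['⁺']), (['^','-'], ['⁻']), (['^','='], ['⁼'])]

-- 'key in superscript_map' + 'superscript_map[key]' as one first-match lookup
def pvLookup (m : List (List Char × List Char)) (k : List Char) : Option (List Char) :=
  match m with
  | [] => none
  | (a, b) :: rest => if a = k then some b else pvLookup rest k

-- B's while-loop over the cursor i, as recursion on the remaining characters
def pvScanGo : List Char → List Char
  | [] => []
  | c :: rest =>
    if c = '^' then
      let three := List.take 3 (c :: rest)
      match (if three.length = 3 then pvLookup pvSupMapB three else none) with
      | some rep => rep ++ pvScanGo (List.drop 2 rest)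
      | none =>
        let two := List.take 2 (c :: rest)
        match (if two.length = 2 then pvLookup pvSupMapB two else none) with
        | some rep => rep ++ pvScanGo (List.drop 1 rest)
        | none => c :: pvScanGo rest
    else c :: pvScanGo rest
termination_by l => l.length
decreasing_by all_goals simp [List.length_drop]

def fallback_superscript_processing_py_alt (text : String) : String :=
  if text = "" ∨ PySem.Str.isIn "^" text = false then text
  else String.ofList (pvScanGo text.toList)

-- ===== PRECONDITION & SPEC =====
def Spec_fallback_superscript_processing_py (text : String) (out : String) : Prop := out = fallback_superscript_processing_py_alt text
instance (text : String) (out : String) : Decidable (Spec_fallback_superscript_processing_py text out) := by unfold Spec_fallback_superscript_processing_py; infer_instance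

-- ===== CLAIM (what is proved, stated in full; the proofs are below) =====
def Claim_equal_fallback_superscript_processing_py : Prop := ∀ (text : String), Dom_fallback_superscript_processing_py text → Spec_fallback_superscript_processing_py text (fallback_superscript_processing_py text)

-- ===== LEMMAS AND PROOFS =====

-- A's pattern order: sorted(keys, key=len, reverse=True) is stable, 3-char keys first
def pvP22 : List (List Char × List Char) :=
  [(['^','1','0'], ['¹','⁰']), (['^','1','1'], ['¹','¹']), (['^','1','2'], ['¹','²']),
   (['^','0'], ['⁰']), (['^','1'], ['¹']), (['^','2'], ['²']), (['^','3'], ['³']), (['^','4'], ['⁴']),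
   (['^','5'], ['⁵']), (['^','6'], ['⁶']), (['^','7'], ['⁷']), (['^','8'], ['⁸']), (['^','9'], ['⁹']),
   (['^','n'], ['ⁿ']), (['^','x'], ['ˣ']), (['^','y'], ['ʸ']), (['^','i'], ['ⁱ']), (['^','j'], ['ʲ']), (['^','k'], ['ᵏ']),
   (['^','+'], ['⁺']), (['^','-'], ['⁻']), (['^','='], ['⁼'])]

def pvFoldP (ps : List (List Char × List Char)) (l : List Char) : List Char :=
  ps.foldl (fun r p => PySem.Chars.replace r p.1 p.2) l

-- the ASCII characters that may follow '^' inside a pattern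
def pvKEY : List Char := ['0','1','2','3','4','5','6','7','8','9','n','x','y','i','j','k','+','-','=']

def pvGood (P : List (List Char × List Char)) : Prop :=
  ∀ pr ∈ P, (∃ h2 q, pr.1 = '^' :: h2 :: q ∧ h2 ∈ pvKEY ∧ ∀ x ∈ q, x ∈ pvKEY) ∧
    pr.2 ≠ [] ∧ ∀ x ∈ pr.2, x ≠ '^' ∧ x ∉ pvKEY

set_option maxRecDepth 8192 in
lemma pvGoodP22 : pvGood pvP22 := by
  intro pr hpr
  fin_cases hpr <;>
    exact ⟨⟨_, _, rfl, by decide, by intro x hx; fin_cases hx <;> decide⟩, by decide,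
      by intro x hx; fin_cases hx <;> decide⟩

-- ---- facts about PySem.Chars.replace (via its fuelled worker go) ----

lemma pvGo_zero (old new l acc : List Char) :
    PySem.Chars.replace.go old new 0 l acc = acc.reverse ++ l := by
  rw [PySem.Chars.replace.go.eq_def]

lemma pvGo_nil (old new : List Char) (fuel : Nat) (acc : List Char) :
    PySem.Chars.replace.go old new fuel [] acc = acc.reverse := by
  rw [PySem.Chars.replace.go.eq_def]
  cases fuel <;> simp

lemma pvGo_succ_cons (old new : List Char) (fuel : Nat) (c : Char) (t acc : List Char) :
    PySem.Chars.replace.go old new (fuel + 1) (c :: t) acc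
      = if old.isPrefixOf (c :: t) = true
          then PySem.Chars.replace.go old new fuel (List.drop old.length (c :: t)) (new.reverse ++ acc)
          else PySem.Chars.replace.go old new fuel t (c :: acc) := by
  rw [PySem.Chars.replace.go.eq_def]

lemma pvGo_acc (old new : List Char) (fuel : Nat) :
    ∀ (l acc : List Char), PySem.Chars.replace.go old new fuel l acc
      = acc.reverse ++ PySem.Chars.replace.go old new fuel l [] := by
  induction fuel with
  | zero => intro l acc; rw [pvGo_zero, pvGo_zero]; simp
  | succ n ih =>
    intro l acc
    match l with
    | [] => rw [pvGo_nil, pvGo_nil]; simp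
    | c :: t =>
      rw [pvGo_succ_cons, pvGo_succ_cons]
      by_cases h : old.isPrefixOf (c :: t) = true
      · rw [if_pos h, if_pos h]
        rw [ih _ (new.reverse ++ acc), ih _ (new.reverse ++ [])]
        simp
      · rw [if_neg h, if_neg h]
        rw [ih t (c :: acc), ih t [c]]
        simp

lemma pvGo_fuel (old new : List Char) (hold : old ≠ []) :
    ∀ (fuel fuel' : Nat) (l : List Char), l.length ≤ fuel → l.length ≤ fuel' →
      PySem.Chars.replace.go old new fuel l [] = PySem.Chars.replace.go old new fuel' l [] := by
  intro fuel
  induction fuel with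
  | zero =>
    intro fuel' l hl _
    match l, hl with
    | [], _ => rw [pvGo_zero, pvGo_nil]; simp
  | succ n ih =>
    intro fuel' l hl hl'
    match l with
    | [] => rw [pvGo_nil, pvGo_nil]
    | c :: t =>
      match fuel' with
      | 0 => simp at hl'
      | m + 1 =>
        have h1 : 1 ≤ old.length := by
          cases old with
          | nil => exact absurd rfl hold
          | cons a b => simp
        rw [pvGo_succ_cons, pvGo_succ_cons]
        by_cases h : old.isPrefixOf (c :: t) = true
        · rw [if_pos h, if_pos h]
          rw [pvGo_acc old new n, pvGo_acc old new m]
          refine congrArg (fun z => (new.reverse ++ ([] : List Char)).reverse ++ z) ?_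
          have hlen : (List.drop old.length (c :: t)).length ≤ t.length := by
            simp only [List.length_drop, List.length_cons]
            omega
          have hln : t.length ≤ n := by simp at hl; omega
          have hlm : t.length ≤ m := by simp at hl'; omega
          exact ih m (List.drop old.length (c :: t)) (le_trans hlen hln) (le_trans hlen hlm)
        · rw [if_neg h, if_neg h]
          rw [pvGo_acc old new n, pvGo_acc old new m]
          refine congrArg (fun z => ((c :: ([] : List Char)).reverse : List Char) ++ z) ?_
          exact ih m t (by simp at hl; omega) (by simp at hl'; omega)

lemma pvReplace_nil (old new : List Char) (h : old ≠ []) :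
    PySem.Chars.replace [] old new = [] := by
  simp [PySem.Chars.replace, List.isEmpty_iff, h, PySem.Chars.replace.go]

lemma pvReplace_cons_not_prefix (old new : List Char) (c : Char) (t : List Char)
    (hold : old ≠ []) (h : ¬ old.isPrefixOf (c :: t) = true) :
    PySem.Chars.replace (c :: t) old new = c :: PySem.Chars.replace t old new := by
  simp only [PySem.Chars.replace, List.isEmpty_iff, hold, if_false]
  rw [show (c :: t).length = t.length + 1 from rfl]
  rw [pvGo_succ_cons, if_neg h]
  rw [pvGo_acc old new t.length t [c]]
  simp

lemma pvReplace_prefix (old new t : List Char) (hold : old ≠ []) :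
    PySem.Chars.replace (old ++ t) old new = new ++ PySem.Chars.replace t old new := by
  simp only [PySem.Chars.replace, List.isEmpty_iff, hold, if_false]
  match old, hold with
  | a :: as, hold =>
    have hpre : (a :: as).isPrefixOf (a :: (as ++ t)) = true := by
      rw [← List.cons_append]
      simp [List.isPrefixOf_iff_prefix]
    rw [show (a :: as) ++ t = a :: (as ++ t) from rfl]
    rw [show (a :: (as ++ t)).length = (as.length + t.length) + 1 by
      simp only [List.length_cons, List.length_append]]
    rw [pvGo_succ_cons, if_pos hpre]
    rw [show List.drop (a :: as).length (a :: (as ++ t)) = t by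
      rw [← List.cons_append]
      simpa using List.drop_left (a :: as) t]
    rw [pvGo_acc]
    simp only [List.append_nil, List.reverse_reverse]
    congr 1
    exact pvGo_fuel (a :: as) new (by simp) _ _ t (by omega) (le_refl _)

lemma pvReplace_head (old new t : List Char) (hold : old ≠ []) (hnew : new ≠ []) :
    (PySem.Chars.replace t old new).head? = t.head? ∨
    (PySem.Chars.replace t old new).head? = new.head? := by
  match t with
  | [] => left; rw [pvReplace_nil _ _ hold]
  | c :: t' =>
    by_cases h : old.isPrefixOf (c :: t') = true
    · right
      obtain ⟨u, hu⟩ := (List.isPrefixOf_iff_prefix.mp h)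
      rw [← hu, pvReplace_prefix _ _ _ hold]
      match new, hnew with
      | b :: bs, _ => simp
    · left
      rw [pvReplace_cons_not_prefix _ _ _ _ hold h]
      simp

-- ---- facts about the 22-pass fold ----

lemma pvGood_tail {p : List Char × List Char} {P : List (List Char × List Char)}
    (h : pvGood (p :: P)) : pvGood P :=
  fun pr hpr => h pr (List.mem_cons_of_mem _ hpr)

lemma pvFoldP_nil (P : List (List Char × List Char)) (hP : pvGood P) :
    pvFoldP P [] = [] := by
  induction P with
  | nil => rfl
  | cons p P ih =>
    obtain ⟨⟨h2, q, hp1, _⟩, _, _⟩ := hP p List.mem_cons_self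
    have hold : p.1 ≠ [] := by rw [hp1]; simp
    simp only [pvFoldP, List.foldl_cons]
    rw [pvReplace_nil _ _ hold]
    exact ih (pvGood_tail hP)

lemma pvFoldP_cons (P : List (List Char × List Char)) (hP : pvGood P)
    (c : Char) (hc : c ≠ '^') (t : List Char) :
    pvFoldP P (c :: t) = c :: pvFoldP P t := by
  induction P generalizing t with
  | nil => rfl
  | cons p P ih =>
    obtain ⟨⟨h2, q, hp1, _⟩, _, _⟩ := hP p List.mem_cons_self
    have hold : p.1 ≠ [] := by rw [hp1]; simp
    have hnp : ¬ p.1.isPrefixOf (c :: t) = true := by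
      rw [hp1]
      simp [List.isPrefixOf]
      intro h
      exact absurd h.symm hc
    simp only [pvFoldP, List.foldl_cons]
    rw [pvReplace_cons_not_prefix _ _ _ _ hold hnp]
    exact ih (pvGood_tail hP) _

lemma pvFoldP_append_left (P : List (List Char × List Char)) (hP : pvGood P)
    (a : List Char) (ha : ∀ x ∈ a, x ≠ '^') (t : List Char) :
    pvFoldP P (a ++ t) = a ++ pvFoldP P t := by
  induction a with
  | nil => rfl
  | cons x a ih =>
    simp only [List.cons_append]
    rw [pvFoldP_cons P hP x (ha x List.mem_cons_self) (a ++ t),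
        ih (fun y hy => ha y (List.mem_cons_of_mem _ hy))]

-- heads of intermediate strings: the original head, or a replacement head (never a key char)
def pvHeadOK (r u : List Char) : Prop :=
  ∀ x, u.head? = some x → r.head? = some x ∨ x ∉ pvKEY

lemma pvCaretNoKey : ('^' : Char) ∉ pvKEY := by decide

lemma pvHeadOK_step {r u old new : List Char} (hold : old ≠ []) (hnew : new ≠ [])
    (hnk : ∀ x ∈ new, x ∉ pvKEY) (h : pvHeadOK r u) :
    pvHeadOK r (PySem.Chars.replace u old new) := by
  intro x hx
  rcases pvReplace_head old new u hold hnew with he | he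
  · exact h x (he ▸ hx)
  · right
    rw [he] at hx
    match new, hnew with
    | b :: bs, _ =>
      simp at hx
      exact hx ▸ hnk b List.mem_cons_self

-- passes whose pattern does not match here leave '^'::c::· intact and act only on the tail
lemma pvFoldP_caret (P : List (List Char × List Char)) (hP : pvGood P)
    (c : Char) (hcK : c ∈ pvKEY) (r : List Char)
    (hpre : ∀ pr ∈ P, ∀ q, pr.1 = '^' :: c :: q → ∃ d, q = [d] ∧ d ∈ pvKEY ∧ r.head? ≠ some d) :
    ∀ u, pvHeadOK r u → pvFoldP P ('^' :: c :: u) = '^' :: c :: pvFoldP P u := by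
  induction P with
  | nil => intro u _; rfl
  | cons p P ih =>
    intro u hu
    obtain ⟨⟨h2, q, hp1, hh2, hqK⟩, hn, hnchars⟩ := hP p List.mem_cons_self
    have hold : p.1 ≠ [] := by rw [hp1]; simp
    have hc : c ≠ '^' := fun h => pvCaretNoKey (h ▸ hcK)
    have hnp : ¬ p.1.isPrefixOf ('^' :: c :: u) = true := by
      by_cases hh : h2 = c
      · have hp1' : p.1 = '^' :: c :: q := by rw [hp1, hh]
        obtain ⟨d, hqd, hdK, hrd⟩ := hpre p List.mem_cons_self q hp1'
        rw [hp1', hqd]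
        cases u with
        | nil => simp
        | cons x u' =>
          simp only [List.isPrefixOf_iff_prefix, List.cons_prefix_cons, List.nil_prefix,
            and_true, true_and]
          intro hdx
          rcases hu x rfl with h' | h'
          · exact hrd (by rw [hdx]; exact h')
          · exact h' (hdx ▸ hdK)
      · rw [hp1]
        simp only [List.isPrefixOf_iff_prefix, List.cons_prefix_cons, true_and, not_and]
        intro hcc _
        exact hh hcc
    have hnp2 : ¬ p.1.isPrefixOf (c :: u) = true := by
      rw [hp1]
      simp [List.isPrefixOf]
      intro h
      exact absurd h.symm hc
    simp only [pvFoldP, List.foldl_cons]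
    rw [pvReplace_cons_not_prefix _ _ _ _ hold hnp,
        pvReplace_cons_not_prefix _ _ _ _ hold hnp2]
    exact ih (pvGood_tail hP)
      (fun pr hpr => hpre pr (List.mem_cons_of_mem _ hpr))
      _ (pvHeadOK_step hold hn (fun x hx => (hnchars x hx).2) hu)

-- a '^' followed by a non-key character passes through every pass untouched
lemma pvFoldP_caret_nomatch (P : List (List Char × List Char)) (hP : pvGood P) :
    ∀ t, (∀ x, t.head? = some x → x ∉ pvKEY) → pvFoldP P ('^' :: t) = '^' :: pvFoldP P t := by
  induction P with
  | nil => intro t _; rfl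
  | cons p P ih =>
    intro t ht
    obtain ⟨⟨h2, q, hp1, hh2, _⟩, hn, hnchars⟩ := hP p List.mem_cons_self
    have hold : p.1 ≠ [] := by rw [hp1]; simp
    have hnp : ¬ p.1.isPrefixOf ('^' :: t) = true := by
      rw [hp1]
      cases t with
      | nil => simp [List.isPrefixOf]
      | cons x t' =>
        simp only [List.isPrefixOf_iff_prefix, List.cons_prefix_cons, true_and, not_and]
        intro hx _
        exact (ht x rfl) (hx ▸ hh2)
    simp only [pvFoldP, List.foldl_cons]
    rw [pvReplace_cons_not_prefix _ _ _ _ hold hnp]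
    refine ih (pvGood_tail hP) _ (fun x hx => ?_)
    rcases pvReplace_head p.1 p.2 t hold hn with he | he
    · exact ht x (he ▸ hx)
    · rw [he] at hx
      rcases hp2 : p.2 with _ | ⟨b, bs⟩
      · exact absurd hp2 hn
      · rw [hp2] at hx
        have hbx : b = x := by injection hx
        exact hbx ▸ (hnchars b (by rw [hp2]; exact List.mem_cons_self)).2

lemma pvFoldP_split (pre post : List (List Char × List Char)) (p : List Char × List Char) (l : List Char) :
    pvFoldP (pre ++ p :: post) l = pvFoldP post (PySem.Chars.replace (pvFoldP pre l) p.1 p.2) := by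
  simp [pvFoldP, List.foldl_append]

-- a matched 2-char pattern: earlier passes skip, the pattern's pass fires, later passes skip the output
lemma pvFoldP_match2 (pre post : List (List Char × List Char)) (c : Char) (n r : List Char)
    (hsplit : pvP22 = pre ++ (['^', c], n) :: post)
    (hcK : c ∈ pvKEY)
    (hpre : ∀ pr ∈ pre, ∀ q, pr.1 = '^' :: c :: q → ∃ d, q = [d] ∧ d ∈ pvKEY ∧ r.head? ≠ some d) :
    pvFoldP pvP22 ('^' :: c :: r) = n ++ pvFoldP pvP22 r := by
  have hg := pvGoodP22
  rw [hsplit] at hg ⊢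
  have hgpre : pvGood pre := fun pr hpr => hg pr (by simp [hpr])
  have hgpost : pvGood post := fun pr hpr => hg pr (by simp [hpr])
  have hme := hg (['^', c], n) (by simp)
  rw [pvFoldP_split, pvFoldP_split]
  rw [pvFoldP_caret pre hgpre c hcK r hpre r (fun x hx => Or.inl hx)]
  rw [show ('^' :: c :: pvFoldP pre r) = ['^', c] ++ pvFoldP pre r from rfl]
  rw [pvReplace_prefix _ _ _ (by simp)]
  exact pvFoldP_append_left post hgpost n (fun x hx => (hme.2.2 x hx).1) _

-- a matched 3-char pattern
lemma pvFoldP_match3 (pre post : List (List Char × List Char)) (c3 : Char) (n r : List Char)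
    (hsplit : pvP22 = pre ++ (['^', '1', c3], n) :: post)
    (hc3 : c3 ≠ '^')
    (hpre : ∀ pr ∈ pre, ∀ q, pr.1 = '^' :: '1' :: q → ∃ d, q = [d] ∧ d ∈ pvKEY ∧ c3 ≠ d) :
    pvFoldP pvP22 ('^' :: '1' :: c3 :: r) = n ++ pvFoldP pvP22 r := by
  have hg := pvGoodP22
  rw [hsplit] at hg ⊢
  have hgpre : pvGood pre := fun pr hpr => hg pr (by simp [hpr])
  have hgpost : pvGood post := fun pr hpr => hg pr (by simp [hpr])
  have hme := hg (['^', '1', c3], n) (by simp)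
  rw [pvFoldP_split, pvFoldP_split]
  rw [pvFoldP_caret pre hgpre '1' (by decide) (c3 :: r)
        (fun pr hpr q hq => by
          obtain ⟨d, hqd, hdK, hne⟩ := hpre pr hpr q hq
          refine ⟨d, hqd, hdK, ?_⟩
          simp only [List.head?_cons]
          exact fun h => hne (Option.some.inj h))
        (c3 :: r) (fun x hx => Or.inl hx)]
  rw [pvFoldP_cons pre hgpre c3 hc3 r]
  rw [show ('^' :: '1' :: c3 :: pvFoldP pre r) = ['^', '1', c3] ++ pvFoldP pre r from rfl]
  rw [pvReplace_prefix _ _ _ (by simp)]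
  exact pvFoldP_append_left post hgpost n (fun x hx => (hme.2.2 x hx).1) _

-- ---- the master equivalence on character lists ----

set_option maxHeartbeats 2000000 in
lemma pvMaster : ∀ (fuel : Nat) (l : List Char), l.length ≤ fuel → pvFoldP pvP22 l = pvScanGo l := by
  intro fuel
  induction fuel with
  | zero =>
    intro l hl
    match l, hl with
    | [], _ => rw [pvFoldP_nil _ pvGoodP22]; simp [pvScanGo]
  | succ nfuel ih =>
    intro l hl
    match l with
    | [] => rw [pvFoldP_nil _ pvGoodP22]; simp [pvScanGo]
    | c :: t =>
      by_cases hc : c = '^'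
      · subst hc
        match t with
        | [] =>
          rw [pvFoldP_caret_nomatch _ pvGoodP22 [] (by simp), pvFoldP_nil _ pvGoodP22]
          simp [pvScanGo, pvLookup, pvSupMapB]
        | d :: r =>
          by_cases hd : d ∈ pvKEY
          · have hr : r.length ≤ nfuel := by simp at hl; omega
            fin_cases hd
            · -- d = '0'
              rw [pvFoldP_match2 [(['^','1','0'], ['¹','⁰']), (['^','1','1'], ['¹','¹']), (['^','1','2'], ['¹','²'])] [(['^','1'], ['¹']), (['^','2'], ['²']), (['^','3'], ['³']), (['^','4'], ['⁴']), (['^','5'], ['⁵']), (['^','6'], ['⁶']), (['^','7'], ['⁷']), (['^','8'], ['⁸']), (['^','9'], ['⁹']), (['^','n'], ['ⁿ']), (['^','x'], ['ˣ']), (['^','y'], ['ʸ']), (['^','i'], ['ⁱ']), (['^','j'], ['ʲ']), (['^','k'], ['ᵏ']), (['^','+'], ['⁺']), (['^','-'], ['⁻']), (['^','='], ['⁼'])] '0' ['⁰'] r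
                    (by rfl) (by decide) (by rintro pr hpr q hq; fin_cases hpr <;> simp_all [pvKEY])]
              rw [ih r hr]
              cases r <;> simp [pvScanGo, pvLookup, pvSupMapB]
            · -- d = '1': three-char keys may fire
              match r with
              | [] =>
                rw [pvFoldP_match2 [(['^','1','0'], ['¹','⁰']), (['^','1','1'], ['¹','¹']), (['^','1','2'], ['¹','²']), (['^','0'], ['⁰'])] [(['^','2'], ['²']), (['^','3'], ['³']), (['^','4'], ['⁴']), (['^','5'], ['⁵']), (['^','6'], ['⁶']), (['^','7'], ['⁷']), (['^','8'], ['⁸']), (['^','9'], ['⁹']), (['^','n'], ['ⁿ']), (['^','x'], ['ˣ']), (['^','y'], ['ʸ']), (['^','i'], ['ⁱ']), (['^','j'], ['ʲ']), (['^','k'], ['ᵏ']), (['^','+'], ['⁺']), (['^','-'], ['⁻']), (['^','='], ['⁼'])] '1' ['¹'] []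
                      (by rfl) (by decide) (by rintro pr hpr q hq; fin_cases hpr <;> simp_all [pvKEY] <;> exact ⟨_, hq.symm, by simp_all [pvKEY]⟩)]
                rw [pvFoldP_nil _ pvGoodP22]
                simp [pvScanGo, pvLookup, pvSupMapB]
              | e :: r2 =>
                have hr2 : r2.length ≤ nfuel := by simp at hl; omega
                by_cases he0 : e = '0'
                · subst he0
                  rw [pvFoldP_match3 [] [(['^','1','1'], ['¹','¹']), (['^','1','2'], ['¹','²']), (['^','0'], ['⁰']), (['^','1'], ['¹']), (['^','2'], ['²']), (['^','3'], ['³']), (['^','4'], ['⁴']), (['^','5'], ['⁵']), (['^','6'], ['⁶']), (['^','7'], ['⁷']), (['^','8'], ['⁸']), (['^','9'], ['⁹']), (['^','n'], ['ⁿ']), (['^','x'], ['ˣ']), (['^','y'], ['ʸ']), (['^','i'], ['ⁱ']), (['^','j'], ['ʲ']), (['^','k'], ['ᵏ']), (['^','+'], ['⁺']), (['^','-'], ['⁻']), (['^','='], ['⁼'])] '0' ['¹','⁰'] r2 (by rfl) (by decide)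
                        (by rintro pr hpr q hq; simp at hpr)]
                  rw [ih r2 hr2]
                  simp [pvScanGo, pvLookup, pvSupMapB]
                · by_cases he1 : e = '1'
                  · subst he1
                    rw [pvFoldP_match3 [(['^','1','0'], ['¹','⁰'])] [(['^','1','2'], ['¹','²']), (['^','0'], ['⁰']), (['^','1'], ['¹']), (['^','2'], ['²']), (['^','3'], ['³']), (['^','4'], ['⁴']), (['^','5'], ['⁵']), (['^','6'], ['⁶']), (['^','7'], ['⁷']), (['^','8'], ['⁸']), (['^','9'], ['⁹']), (['^','n'], ['ⁿ']), (['^','x'], ['ˣ']), (['^','y'], ['ʸ']), (['^','i'], ['ⁱ']), (['^','j'], ['ʲ']), (['^','k'], ['ᵏ']), (['^','+'], ['⁺']), (['^','-'], ['⁻']), (['^','='], ['⁼'])] '1' ['¹','¹'] r2 (by rfl) (by decide)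
                          (by rintro pr hpr q hq; fin_cases hpr <;> simp_all [pvKEY] <;> exact ⟨_, hq.symm, by simp_all [pvKEY]⟩)]
                    rw [ih r2 hr2]
                    simp [pvScanGo, pvLookup, pvSupMapB]
                  · by_cases he2 : e = '2'
                    · subst he2
                      rw [pvFoldP_match3 [(['^','1','0'], ['¹','⁰']), (['^','1','1'], ['¹','¹'])] [(['^','0'], ['⁰']), (['^','1'], ['¹']), (['^','2'], ['²']), (['^','3'], ['³']), (['^','4'], ['⁴']), (['^','5'], ['⁵']), (['^','6'], ['⁶']), (['^','7'], ['⁷']), (['^','8'], ['⁸']), (['^','9'], ['⁹']), (['^','n'], ['ⁿ']), (['^','x'], ['ˣ']), (['^','y'], ['ʸ']), (['^','i'], ['ⁱ']), (['^','j'], ['ʲ']), (['^','k'], ['ᵏ']), (['^','+'], ['⁺']), (['^','-'], ['⁻']), (['^','='], ['⁼'])] '2' ['¹','²'] r2 (by rfl) (by decide)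
                            (by rintro pr hpr q hq; fin_cases hpr <;> simp_all [pvKEY] <;> exact ⟨_, hq.symm, by simp_all [pvKEY]⟩)]
                      rw [ih r2 hr2]
                      simp [pvScanGo, pvLookup, pvSupMapB]
                    · rw [pvFoldP_match2 [(['^','1','0'], ['¹','⁰']), (['^','1','1'], ['¹','¹']), (['^','1','2'], ['¹','²']), (['^','0'], ['⁰'])] [(['^','2'], ['²']), (['^','3'], ['³']), (['^','4'], ['⁴']), (['^','5'], ['⁵']), (['^','6'], ['⁶']), (['^','7'], ['⁷']), (['^','8'], ['⁸']), (['^','9'], ['⁹']), (['^','n'], ['ⁿ']), (['^','x'], ['ˣ']), (['^','y'], ['ʸ']), (['^','i'], ['ⁱ']), (['^','j'], ['ʲ']), (['^','k'], ['ᵏ']), (['^','+'], ['⁺']), (['^','-'], ['⁻']), (['^','='], ['⁼'])] '1' ['¹'] (e :: r2)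
                            (by rfl) (by decide)
                            (by rintro pr hpr q hq; fin_cases hpr <;> simp_all [pvKEY] <;> exact ⟨_, hq.symm, by simp_all [pvKEY]⟩)]
                      rw [ih (e :: r2) hr]
                      simp [pvScanGo, pvLookup, pvSupMapB, he0, he1, he2,
                        Ne.symm he0, Ne.symm he1, Ne.symm he2]
            · -- d = '2'
              rw [pvFoldP_match2 [(['^','1','0'], ['¹','⁰']), (['^','1','1'], ['¹','¹']), (['^','1','2'], ['¹','²']), (['^','0'], ['⁰']), (['^','1'], ['¹'])] [(['^','3'], ['³']), (['^','4'], ['⁴']), (['^','5'], ['⁵']), (['^','6'], ['⁶']), (['^','7'], ['⁷']), (['^','8'], ['⁸']), (['^','9'], ['⁹']), (['^','n'], ['ⁿ']), (['^','x'], ['ˣ']), (['^','y'], ['ʸ']), (['^','i'], ['ⁱ']), (['^','j'], ['ʲ']), (['^','k'], ['ᵏ']), (['^','+'], ['⁺']), (['^','-'], ['⁻']), (['^','='], ['⁼'])] '2' ['²'] r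
                    (by rfl) (by decide) (by rintro pr hpr q hq; fin_cases hpr <;> simp_all [pvKEY])]
              rw [ih r hr]
              cases r <;> simp [pvScanGo, pvLookup, pvSupMapB]
            · -- d = '3'
              rw [pvFoldP_match2 [(['^','1','0'], ['¹','⁰']), (['^','1','1'], ['¹','¹']), (['^','1','2'], ['¹','²']), (['^','0'], ['⁰']), (['^','1'], ['¹']), (['^','2'], ['²'])] [(['^','4'], ['⁴']), (['^','5'], ['⁵']), (['^','6'], ['⁶']), (['^','7'], ['⁷']), (['^','8'], ['⁸']), (['^','9'], ['⁹']), (['^','n'], ['ⁿ']), (['^','x'], ['ˣ']), (['^','y'], ['ʸ']), (['^','i'], ['ⁱ']), (['^','j'], ['ʲ']), (['^','k'], ['ᵏ']), (['^','+'], ['⁺']), (['^','-'], ['⁻']), (['^','='], ['⁼'])] '3' ['³'] r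
                    (by rfl) (by decide) (by rintro pr hpr q hq; fin_cases hpr <;> simp_all [pvKEY])]
              rw [ih r hr]
              cases r <;> simp [pvScanGo, pvLookup, pvSupMapB]
            · -- d = '4'
              rw [pvFoldP_match2 [(['^','1','0'], ['¹','⁰']), (['^','1','1'], ['¹','¹']), (['^','1','2'], ['¹','²']), (['^','0'], ['⁰']), (['^','1'], ['¹']), (['^','2'], ['²']), (['^','3'], ['³'])] [(['^','5'], ['⁵']), (['^','6'], ['⁶']), (['^','7'], ['⁷']), (['^','8'], ['⁸']), (['^','9'], ['⁹']), (['^','n'], ['ⁿ']), (['^','x'], ['ˣ']), (['^','y'], ['ʸ']), (['^','i'], ['ⁱ']), (['^','j'], ['ʲ']), (['^','k'], ['ᵏ']), (['^','+'], ['⁺']), (['^','-'], ['⁻']), (['^','='], ['⁼'])] '4' ['⁴'] r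
                    (by rfl) (by decide) (by rintro pr hpr q hq; fin_cases hpr <;> simp_all [pvKEY])]
              rw [ih r hr]
              cases r <;> simp [pvScanGo, pvLookup, pvSupMapB]
            · -- d = '5'
              rw [pvFoldP_match2 [(['^','1','0'], ['¹','⁰']), (['^','1','1'], ['¹','¹']), (['^','1','2'], ['¹','²']), (['^','0'], ['⁰']), (['^','1'], ['¹']), (['^','2'], ['²']), (['^','3'], ['³']), (['^','4'], ['⁴'])] [(['^','6'], ['⁶']), (['^','7'], ['⁷']), (['^','8'], ['⁸']), (['^','9'], ['⁹']), (['^','n'], ['ⁿ']), (['^','x'], ['ˣ']), (['^','y'], ['ʸ']), (['^','i'], ['ⁱ']), (['^','j'], ['ʲ']), (['^','k'], ['ᵏ']), (['^','+'], ['⁺']), (['^','-'], ['⁻']), (['^','='], ['⁼'])] '5' ['⁵'] r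
                    (by rfl) (by decide) (by rintro pr hpr q hq; fin_cases hpr <;> simp_all [pvKEY])]
              rw [ih r hr]
              cases r <;> simp [pvScanGo, pvLookup, pvSupMapB]
            · -- d = '6'
              rw [pvFoldP_match2 [(['^','1','0'], ['¹','⁰']), (['^','1','1'], ['¹','¹']), (['^','1','2'], ['¹','²']), (['^','0'], ['⁰']), (['^','1'], ['¹']), (['^','2'], ['²']), (['^','3'], ['³']), (['^','4'], ['⁴']), (['^','5'], ['⁵'])] [(['^','7'], ['⁷']), (['^','8'], ['⁸']), (['^','9'], ['⁹']), (['^','n'], ['ⁿ']), (['^','x'], ['ˣ']), (['^','y'], ['ʸ']), (['^','i'], ['ⁱ']), (['^','j'], ['ʲ']), (['^','k'], ['ᵏ']), (['^','+'], ['⁺']), (['^','-'], ['⁻']), (['^','='], ['⁼'])] '6' ['⁶'] r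
                    (by rfl) (by decide) (by rintro pr hpr q hq; fin_cases hpr <;> simp_all [pvKEY])]
              rw [ih r hr]
              cases r <;> simp [pvScanGo, pvLookup, pvSupMapB]
            · -- d = '7'
              rw [pvFoldP_match2 [(['^','1','0'], ['¹','⁰']), (['^','1','1'], ['¹','¹']), (['^','1','2'], ['¹','²']), (['^','0'], ['⁰']), (['^','1'], ['¹']), (['^','2'], ['²']), (['^','3'], ['³']), (['^','4'], ['⁴']), (['^','5'], ['⁵']), (['^','6'], ['⁶'])] [(['^','8'], ['⁸']), (['^','9'], ['⁹']), (['^','n'], ['ⁿ']), (['^','x'], ['ˣ']), (['^','y'], ['ʸ']), (['^','i'], ['ⁱ']), (['^','j'], ['ʲ']), (['^','k'], ['ᵏ']), (['^','+'], ['⁺']), (['^','-'], ['⁻']), (['^','='], ['⁼'])] '7' ['⁷'] r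
                    (by rfl) (by decide) (by rintro pr hpr q hq; fin_cases hpr <;> simp_all [pvKEY])]
              rw [ih r hr]
              cases r <;> simp [pvScanGo, pvLookup, pvSupMapB]
            · -- d = '8'
              rw [pvFoldP_match2 [(['^','1','0'], ['¹','⁰']), (['^','1','1'], ['¹','¹']), (['^','1','2'], ['¹','²']), (['^','0'], ['⁰']), (['^','1'], ['¹']), (['^','2'], ['²']), (['^','3'], ['³']), (['^','4'], ['⁴']), (['^','5'], ['⁵']), (['^','6'], ['⁶']), (['^','7'], ['⁷'])] [(['^','9'], ['⁹']), (['^','n'], ['ⁿ']), (['^','x'], ['ˣ']), (['^','y'], ['ʸ']), (['^','i'], ['ⁱ']), (['^','j'], ['ʲ']), (['^','k'], ['ᵏ']), (['^','+'], ['⁺']), (['^','-'], ['⁻']), (['^','='], ['⁼'])] '8' ['⁸'] r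
                    (by rfl) (by decide) (by rintro pr hpr q hq; fin_cases hpr <;> simp_all [pvKEY])]
              rw [ih r hr]
              cases r <;> simp [pvScanGo, pvLookup, pvSupMapB]
            · -- d = '9'
              rw [pvFoldP_match2 [(['^','1','0'], ['¹','⁰']), (['^','1','1'], ['¹','¹']), (['^','1','2'], ['¹','²']), (['^','0'], ['⁰']), (['^','1'], ['¹']), (['^','2'], ['²']), (['^','3'], ['³']), (['^','4'], ['⁴']), (['^','5'], ['⁵']), (['^','6'], ['⁶']), (['^','7'], ['⁷']), (['^','8'], ['⁸'])] [(['^','n'], ['ⁿ']), (['^','x'], ['ˣ']), (['^','y'], ['ʸ']), (['^','i'], ['ⁱ']), (['^','j'], ['ʲ']), (['^','k'], ['ᵏ']), (['^','+'], ['⁺']), (['^','-'], ['⁻']), (['^','='], ['⁼'])] '9' ['⁹'] r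
                    (by rfl) (by decide) (by rintro pr hpr q hq; fin_cases hpr <;> simp_all [pvKEY])]
              rw [ih r hr]
              cases r <;> simp [pvScanGo, pvLookup, pvSupMapB]
            · -- d = 'n'
              rw [pvFoldP_match2 [(['^','1','0'], ['¹','⁰']), (['^','1','1'], ['¹','¹']), (['^','1','2'], ['¹','²']), (['^','0'], ['⁰']), (['^','1'], ['¹']), (['^','2'], ['²']), (['^','3'], ['³']), (['^','4'], ['⁴']), (['^','5'], ['⁵']), (['^','6'], ['⁶']), (['^','7'], ['⁷']), (['^','8'], ['⁸']), (['^','9'], ['⁹'])] [(['^','x'], ['ˣ']), (['^','y'], ['ʸ']), (['^','i'], ['ⁱ']), (['^','j'], ['ʲ']), (['^','k'], ['ᵏ']), (['^','+'], ['⁺']), (['^','-'], ['⁻']), (['^','='], ['⁼'])] 'n' ['ⁿ'] r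
                    (by rfl) (by decide) (by rintro pr hpr q hq; fin_cases hpr <;> simp_all [pvKEY])]
              rw [ih r hr]
              cases r <;> simp [pvScanGo, pvLookup, pvSupMapB]
            · -- d = 'x'
              rw [pvFoldP_match2 [(['^','1','0'], ['¹','⁰']), (['^','1','1'], ['¹','¹']), (['^','1','2'], ['¹','²']), (['^','0'], ['⁰']), (['^','1'], ['¹']), (['^','2'], ['²']), (['^','3'], ['³']), (['^','4'], ['⁴']), (['^','5'], ['⁵']), (['^','6'], ['⁶']), (['^','7'], ['⁷']), (['^','8'], ['⁸']), (['^','9'], ['⁹']), (['^','n'], ['ⁿ'])] [(['^','y'], ['ʸ']), (['^','i'], ['ⁱ']), (['^','j'], ['ʲ']), (['^','k'], ['ᵏ']), (['^','+'], ['⁺']), (['^','-'], ['⁻']), (['^','='], ['⁼'])] 'x' ['ˣ'] r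
                    (by rfl) (by decide) (by rintro pr hpr q hq; fin_cases hpr <;> simp_all [pvKEY])]
              rw [ih r hr]
              cases r <;> simp [pvScanGo, pvLookup, pvSupMapB]
            · -- d = 'y'
              rw [pvFoldP_match2 [(['^','1','0'], ['¹','⁰']), (['^','1','1'], ['¹','¹']), (['^','1','2'], ['¹','²']), (['^','0'], ['⁰']), (['^','1'], ['¹']), (['^','2'], ['²']), (['^','3'], ['³']), (['^','4'], ['⁴']), (['^','5'], ['⁵']), (['^','6'], ['⁶']), (['^','7'], ['⁷']), (['^','8'], ['⁸']), (['^','9'], ['⁹']), (['^','n'], ['ⁿ']), (['^','x'], ['ˣ'])] [(['^','i'], ['ⁱ']), (['^','j'], ['ʲ']), (['^','k'], ['ᵏ']), (['^','+'], ['⁺']), (['^','-'], ['⁻']), (['^','='], ['⁼'])] 'y' ['ʸ'] r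
                    (by rfl) (by decide) (by rintro pr hpr q hq; fin_cases hpr <;> simp_all [pvKEY])]
              rw [ih r hr]
              cases r <;> simp [pvScanGo, pvLookup, pvSupMapB]
            · -- d = 'i'
              rw [pvFoldP_match2 [(['^','1','0'], ['¹','⁰']), (['^','1','1'], ['¹','¹']), (['^','1','2'], ['¹','²']), (['^','0'], ['⁰']), (['^','1'], ['¹']), (['^','2'], ['²']), (['^','3'], ['³']), (['^','4'], ['⁴']), (['^','5'], ['⁵']), (['^','6'], ['⁶']), (['^','7'], ['⁷']), (['^','8'], ['⁸']), (['^','9'], ['⁹']), (['^','n'], ['ⁿ']), (['^','x'], ['ˣ']), (['^','y'], ['ʸ'])] [(['^','j'], ['ʲ']), (['^','k'], ['ᵏ']), (['^','+'], ['⁺']), (['^','-'], ['⁻']), (['^','='], ['⁼'])] 'i' ['ⁱ'] r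
                    (by rfl) (by decide) (by rintro pr hpr q hq; fin_cases hpr <;> simp_all [pvKEY])]
              rw [ih r hr]
              cases r <;> simp [pvScanGo, pvLookup, pvSupMapB]
            · -- d = 'j'
              rw [pvFoldP_match2 [(['^','1','0'], ['¹','⁰']), (['^','1','1'], ['¹','¹']), (['^','1','2'], ['¹','²']), (['^','0'], ['⁰']), (['^','1'], ['¹']), (['^','2'], ['²']), (['^','3'], ['³']), (['^','4'], ['⁴']), (['^','5'], ['⁵']), (['^','6'], ['⁶']), (['^','7'], ['⁷']), (['^','8'], ['⁸']), (['^','9'], ['⁹']), (['^','n'], ['ⁿ']), (['^','x'], ['ˣ']), (['^','y'], ['ʸ']), (['^','i'], ['ⁱ'])] [(['^','k'], ['ᵏ']), (['^','+'], ['⁺']), (['^','-'], ['⁻']), (['^','='], ['⁼'])] 'j' ['ʲ'] r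
                    (by rfl) (by decide) (by rintro pr hpr q hq; fin_cases hpr <;> simp_all [pvKEY])]
              rw [ih r hr]
              cases r <;> simp [pvScanGo, pvLookup, pvSupMapB]
            · -- d = 'k'
              rw [pvFoldP_match2 [(['^','1','0'], ['¹','⁰']), (['^','1','1'], ['¹','¹']), (['^','1','2'], ['¹','²']), (['^','0'], ['⁰']), (['^','1'], ['¹']), (['^','2'], ['²']), (['^','3'], ['³']), (['^','4'], ['⁴']), (['^','5'], ['⁵']), (['^','6'], ['⁶']), (['^','7'], ['⁷']), (['^','8'], ['⁸']), (['^','9'], ['⁹']), (['^','n'], ['ⁿ']), (['^','x'], ['ˣ']), (['^','y'], ['ʸ']), (['^','i'], ['ⁱ']), (['^','j'], ['ʲ'])] [(['^','+'], ['⁺']), (['^','-'], ['⁻']), (['^','='], ['⁼'])] 'k' ['ᵏ'] r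
                    (by rfl) (by decide) (by rintro pr hpr q hq; fin_cases hpr <;> simp_all [pvKEY])]
              rw [ih r hr]
              cases r <;> simp [pvScanGo, pvLookup, pvSupMapB]
            · -- d = '+'
              rw [pvFoldP_match2 [(['^','1','0'], ['¹','⁰']), (['^','1','1'], ['¹','¹']), (['^','1','2'], ['¹','²']), (['^','0'], ['⁰']), (['^','1'], ['¹']), (['^','2'], ['²']), (['^','3'], ['³']), (['^','4'], ['⁴']), (['^','5'], ['⁵']), (['^','6'], ['⁶']), (['^','7'], ['⁷']), (['^','8'], ['⁸']), (['^','9'], ['⁹']), (['^','n'], ['ⁿ']), (['^','x'], ['ˣ']), (['^','y'], ['ʸ']), (['^','i'], ['ⁱ']), (['^','j'], ['ʲ']), (['^','k'], ['ᵏ'])] [(['^','-'], ['⁻']), (['^','='], ['⁼'])] '+' ['⁺'] r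
                    (by rfl) (by decide) (by rintro pr hpr q hq; fin_cases hpr <;> simp_all [pvKEY])]
              rw [ih r hr]
              cases r <;> simp [pvScanGo, pvLookup, pvSupMapB]
            · -- d = '-'
              rw [pvFoldP_match2 [(['^','1','0'], ['¹','⁰']), (['^','1','1'], ['¹','¹']), (['^','1','2'], ['¹','²']), (['^','0'], ['⁰']), (['^','1'], ['¹']), (['^','2'], ['²']), (['^','3'], ['³']), (['^','4'], ['⁴']), (['^','5'], ['⁵']), (['^','6'], ['⁶']), (['^','7'], ['⁷']), (['^','8'], ['⁸']), (['^','9'], ['⁹']), (['^','n'], ['ⁿ']), (['^','x'], ['ˣ']), (['^','y'], ['ʸ']), (['^','i'], ['ⁱ']), (['^','j'], ['ʲ']), (['^','k'], ['ᵏ']), (['^','+'], ['⁺'])] [(['^','='], ['⁼'])] '-' ['⁻'] r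
                    (by rfl) (by decide) (by rintro pr hpr q hq; fin_cases hpr <;> simp_all [pvKEY])]
              rw [ih r hr]
              cases r <;> simp [pvScanGo, pvLookup, pvSupMapB]
            · -- d = '='
              rw [pvFoldP_match2 [(['^','1','0'], ['¹','⁰']), (['^','1','1'], ['¹','¹']), (['^','1','2'], ['¹','²']), (['^','0'], ['⁰']), (['^','1'], ['¹']), (['^','2'], ['²']), (['^','3'], ['³']), (['^','4'], ['⁴']), (['^','5'], ['⁵']), (['^','6'], ['⁶']), (['^','7'], ['⁷']), (['^','8'], ['⁸']), (['^','9'], ['⁹']), (['^','n'], ['ⁿ']), (['^','x'], ['ˣ']), (['^','y'], ['ʸ']), (['^','i'], ['ⁱ']), (['^','j'], ['ʲ']), (['^','k'], ['ᵏ']), (['^','+'], ['⁺']), (['^','-'], ['⁻'])] [] '=' ['⁼'] r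
                    (by rfl) (by decide) (by rintro pr hpr q hq; fin_cases hpr <;> simp_all [pvKEY])]
              rw [ih r hr]
              cases r <;> simp [pvScanGo, pvLookup, pvSupMapB]
          · -- d not a key char: the '^' passes through
            have hr : (d :: r).length ≤ nfuel := by simp at hl ⊢; omega
            rw [pvFoldP_caret_nomatch _ pvGoodP22 (d :: r) (by intro x hx; simp at hx; exact hx ▸ hd)]
            rw [ih (d :: r) hr]
            have hd' := hd
            simp only [pvKEY, List.mem_cons, List.not_mem_nil, or_false, not_or] at hd'
            obtain ⟨h0,h1,h2,h3,h4,h5,h6,h7,h8,h9,hn,hx,hy,hi,hj,hk,hp,hm,he⟩ := hd'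
            cases r <;>
              simp [pvScanGo, pvLookup, pvSupMapB, h0,h1,h2,h3,h4,h5,h6,h7,h8,h9,hn,hx,hy,hi,hj,hk,hp,hm,he,
                Ne.symm h0, Ne.symm h1, Ne.symm h2, Ne.symm h3, Ne.symm h4, Ne.symm h5, Ne.symm h6,
                Ne.symm h7, Ne.symm h8, Ne.symm h9, Ne.symm hn, Ne.symm hx, Ne.symm hy, Ne.symm hi,
                Ne.symm hj, Ne.symm hk, Ne.symm hp, Ne.symm hm, Ne.symm he]
      · have hr : t.length ≤ nfuel := by simp at hl; omega
        rw [pvFoldP_cons _ pvGoodP22 c hc t, ih t hr]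
        simp [pvScanGo, hc]

-- ---- bridging A's string-level fold to pvFoldP ----

set_option maxHeartbeats 2000000 in
lemma pvPatterns_eval :
    PySem.List.sorted pvSupMapA.keys (fun s => PySem.Str.len s) true
      = ["^10","^11","^12","^0","^1","^2","^3","^4","^5","^6","^7","^8","^9","^n","^x","^y","^i","^j","^k","^+","^-","^="] := by
  decide

lemma pvA_fold_eval (s : String) :
    (["^10","^11","^12","^0","^1","^2","^3","^4","^5","^6","^7","^8","^9","^n","^x","^y","^i","^j","^k","^+","^-","^="].foldl
        (fun result pattern => PySem.Str.replace result pattern (pvSupMapA.getD pattern "")) s).toList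
      = pvFoldP pvP22 s.toList := by
  simp only [List.foldl_cons, List.foldl_nil, pvFoldP, pvP22, PySem.Str.toList_replace]
  rfl

-- ===== VERDICT (by name: the statement is the Claim_ definition above) =====
theorem fallback_superscript_processing_py_spec : Claim_equal_fallback_superscript_processing_py := by
  intro text _
  unfold Spec_fallback_superscript_processing_py
  unfold fallback_superscript_processing_py fallback_superscript_processing_py_alt
  by_cases hg : text = "" ∨ PySem.Str.isIn "^" text = false
  · rw [if_pos hg, if_pos hg]
  · rw [if_neg hg, if_neg hg]
    apply String.toList_inj.mp
    rw [pvPatterns_eval, pvA_fold_eval, String.toList_ofList]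
    exact pvMaster text.toList.length text.toList (le_refl _)
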